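-- pv_equiv track=rewrite | github.com/FreEM-corpora/FreEMlpm | scripts/4_diff.py | fetch_full_block
-- ===== SOURCE A (Python) =====
-- def fetch_full_block(
--     idx_start: int, idx_end: int,
--     source_index: dict, corrige_index: dict,
--     col_names: list[str]
-- ) -> tuple[list[dict], list[dict]]:
--     """
--     Récupère toutes les lignes du span (idx_start → idx_end) dans les deux index.
--     Retourne deux listes de dicts {col: valeur} pour affichage tabulaire.
--     """
--     block_src = []
--     block_cor = []
--     for idx in range(idx_start, idx_end + 1):
--         s = source_index.get(idx, [])
--         c = corrige_index.get(idx, [])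
--         if s:
--             block_src.append({col_names[i]: s[i] if i < len(s) else "" for i in range(len(col_names))})
--         if c:
--             block_cor.append({col_names[i]: c[i] if i < len(c) else "" for i in range(len(col_names))})
--     return block_src, block_cor
-- ===== SOURCE B (Python) =====
-- def fetch_full_block(
--     idx_start: int, idx_end: int,
--     source_index: dict, corrige_index: dict,
--     col_names: list[str]
-- ) -> tuple[list[dict], list[dict]]:
--     """Build each block from the keys actually present in the span, per index."""
--     def rows(index):
--         out = []
--         for k in sorted(k for k in index if idx_start <= k <= idx_end):
--             v = index[k]
--             if v:
--                 pad = [""] * (len(col_names) - len(v))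
--                 out.append(dict(zip(col_names, v + pad)))
--         return out
--     return rows(source_index), rows(corrige_index)
-- ===== Notes on version B (the rewrite author's own statement) =====
-- stated objective: alternative
-- what changed: Instead of scanning every integer in [idx_start, idx_end] and probing both dicts, B builds each block independently from the keys actually present: it filters each index's keys to the span, sorts them, and pads rows with zip instead of a per-column index loop.
import Mathlib
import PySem

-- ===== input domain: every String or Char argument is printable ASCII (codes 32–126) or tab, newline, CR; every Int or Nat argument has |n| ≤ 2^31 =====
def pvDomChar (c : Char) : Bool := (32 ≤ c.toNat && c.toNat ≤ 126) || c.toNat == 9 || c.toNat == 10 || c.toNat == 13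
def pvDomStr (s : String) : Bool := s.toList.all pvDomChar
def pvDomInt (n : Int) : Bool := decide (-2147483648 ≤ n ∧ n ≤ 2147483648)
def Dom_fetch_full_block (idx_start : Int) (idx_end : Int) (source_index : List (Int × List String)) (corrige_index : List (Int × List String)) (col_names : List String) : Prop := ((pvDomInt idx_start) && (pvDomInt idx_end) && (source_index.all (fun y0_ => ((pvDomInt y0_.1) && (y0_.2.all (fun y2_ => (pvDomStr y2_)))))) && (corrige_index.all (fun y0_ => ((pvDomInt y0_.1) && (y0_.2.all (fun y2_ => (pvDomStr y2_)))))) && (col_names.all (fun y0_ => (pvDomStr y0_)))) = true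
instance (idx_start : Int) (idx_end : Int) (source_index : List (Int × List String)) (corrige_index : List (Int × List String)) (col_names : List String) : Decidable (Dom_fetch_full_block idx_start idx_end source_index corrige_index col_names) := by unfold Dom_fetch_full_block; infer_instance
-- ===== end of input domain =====

-- B builds each block independently from the keys present in the span (filter + sort + zip-padded rows)
-- instead of scanning every integer of the range and probing both dicts: an alternative decomposition.


-- ===== PORT A =====
-- row dict comprehension {col_names[i]: s[i] if i < len(s) else "" for i in range(len(col_names))}
def pvRowA (col_names : List String) (s : List String) : List (String × String) :=
  ((PySem.List.pyRange 0 (PySem.List.len col_names) 1).foldl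
    (fun (d : PySem.Dict String String) i =>
      d.insert (PySem.List.pyGetD col_names i "")
        (if i < PySem.List.len s then PySem.List.pyGetD s i "" else ""))
    PySem.Dict.empty).items

def fetch_full_block (idx_start : Int) (idx_end : Int) (source_index : List (Int × List String)) (corrige_index : List (Int × List String)) (col_names : List String) : (List (List (String × String))) × (List (List (String × String))) :=
  (PySem.List.pyRange idx_start (idx_end + 1) 1).foldl
    (fun (acc : List (List (String × String)) × List (List (String × String))) idx =>
      ((if (PySem.Dict.mk source_index).getD idx [] ≠ [] then acc.1 ++ [pvRowA col_names ((PySem.Dict.mk source_index).getD idx [])] else acc.1),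
       (if (PySem.Dict.mk corrige_index).getD idx [] ≠ [] then acc.2 ++ [pvRowA col_names ((PySem.Dict.mk corrige_index).getD idx [])] else acc.2)))
    ([], [])

-- ===== PORT B =====
-- dict(zip(col_names, v + [""] * (len(col_names) - len(v))))
def pvRowB (col_names : List String) (v : List String) : List (String × String) :=
  (PySem.Dict.ofList (col_names.zip (v ++ List.replicate (col_names.length - v.length) ""))).items

-- rows(index): iterate sorted(k for k in index if idx_start <= k <= idx_end), skip empty values
def pvRowsB (idx_start : Int) (idx_end : Int) (index : List (Int × List String)) (col_names : List String) : List (List (String × String)) :=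
  (PySem.List.sorted
      ((PySem.Set.ofList (index.map Prod.fst)).filter
        (fun k => decide (idx_start ≤ k) && decide (k ≤ idx_end)))
      (fun x => x) false).foldl
    (fun out k =>
      if (PySem.Dict.mk index).getD k [] ≠ []
      then out ++ [pvRowB col_names ((PySem.Dict.mk index).getD k [])] else out) []

def fetch_full_block_alt (idx_start : Int) (idx_end : Int) (source_index : List (Int × List String)) (corrige_index : List (Int × List String)) (col_names : List String) : (List (List (String × String))) × (List (List (String × String))) :=
  (pvRowsB idx_start idx_end source_index col_names,
   pvRowsB idx_start idx_end corrige_index col_names)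

-- ===== PRECONDITION & SPEC =====
def Spec_fetch_full_block (idx_start : Int) (idx_end : Int) (source_index : List (Int × List String)) (corrige_index : List (Int × List String)) (col_names : List String) (out : (List (List (String × String))) × (List (List (String × String)))) : Prop := out = fetch_full_block_alt idx_start idx_end source_index corrige_index col_names
instance (idx_start : Int) (idx_end : Int) (source_index : List (Int × List String)) (corrige_index : List (Int × List String)) (col_names : List String) (out : (List (List (String × String))) × (List (List (String × String)))) : Decidable (Spec_fetch_full_block idx_start idx_end source_index corrige_index col_names out) := by unfold Spec_fetch_full_block; infer_instance

-- ===== CLAIM (what is proved, stated in full; the proofs are below) =====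
def Claim_equal_fetch_full_block : Prop := ∀ (idx_start : Int) (idx_end : Int) (source_index : List (Int × List String)) (corrige_index : List (Int × List String)) (col_names : List String), Dom_fetch_full_block idx_start idx_end source_index corrige_index col_names → Spec_fetch_full_block idx_start idx_end source_index corrige_index col_names (fetch_full_block idx_start idx_end source_index corrige_index col_names)

-- ===== LEMMAS AND PROOFS =====

-- A's pair-state fold splits into two independent folds.
theorem pvPairFold (l : List Int) (p1 p2 : Int → Prop) [DecidablePred p1] [DecidablePred p2]
    (g1 g2 : Int → List (String × String))
    (init : List (List (String × String)) × List (List (String × String))) :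
    l.foldl (fun acc idx =>
        ((if p1 idx then acc.1 ++ [g1 idx] else acc.1),
         (if p2 idx then acc.2 ++ [g2 idx] else acc.2))) init
    = (l.foldl (fun a idx => if p1 idx then a ++ [g1 idx] else a) init.1,
       l.foldl (fun a idx => if p2 idx then a ++ [g2 idx] else a) init.2) := by
  induction l generalizing init with
  | nil => rfl
  | cons x xs ih => simp only [List.foldl_cons, ih]

-- zip-with-padding lists the same (column, value) pairs as the index comprehension
theorem pvZip_eq (col_names s : List String) :
    col_names.zip (s ++ List.replicate (col_names.length - s.length) "")
      = (List.range col_names.length).map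
          (fun k => (col_names.getD k "", if k < s.length then s.getD k "" else "")) := by
  apply List.ext_getElem
  · simp [List.length_zip]; omega
  · intro j hj hj'
    have hjn : j < col_names.length := by simpa using hj'
    by_cases hs : j < s.length
    · simp [List.getElem_zip, hs, hjn, List.getD_eq_getElem?_getD]
    · simp [List.getElem_zip, List.getElem_append, hs, hjn, List.getD_eq_getElem?_getD]

-- The two row builders agree.
theorem pvRow_eq (col_names s : List String) : pvRowA col_names s = pvRowB col_names s := by
  unfold pvRowA pvRowB
  rw [pvZip_eq]
  simp only [PySem.Dict.ofList, PySem.Dict.update, PySem.List.pyRange_one, PySem.List.len_eq]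
  rw [List.foldl_map, List.foldl_map]
  congr 1
  simp only [Int.sub_zero, Int.toNat_natCast]
  apply PySem.List.foldl_congr_mem
  intro d k hk
  have hkn : k < col_names.length := List.mem_range.mp hk
  by_cases hs : k < s.length
  · simp [PySem.List.pyGetD_natCast, hs]
  · simp [PySem.List.pyGetD_natCast, hs]

-- getD probing an absent key yields the default
theorem pvGetD_ne_mem (index : List (Int × List String)) (k : Int)
    (h : (PySem.Dict.mk index).getD k [] ≠ []) : k ∈ index.map Prod.fst := by
  by_contra hmem
  have hk : k ∉ (PySem.Dict.mk index).keys := by simpa using hmem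
  have := PySem.Dict.getD_of_get?_eq_none (d := PySem.Dict.mk index) (k := k) (d0 := ([] : List String))
    ((PySem.Dict.get?_eq_none_iff_not_mem_keys _ _).mpr hk)
  exact h this
-- (name kept: uses first-match getD on the raw association list via Dict.mk)

-- The range scan, filtered to non-empty rows, is exactly the sorted in-span key list so filtered.
theorem pvKeys_eq (idx_start idx_end : Int) (index : List (Int × List String)) :
    (PySem.List.pyRange idx_start (idx_end + 1) 1).filter
        (fun k => decide ((PySem.Dict.mk index).getD k [] ≠ []))
      = (PySem.List.sorted
          ((PySem.Set.ofList (index.map Prod.fst)).filter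
            (fun k => decide (idx_start ≤ k) && decide (k ≤ idx_end)))
          (fun x => x) false).filter
          (fun k => decide ((PySem.Dict.mk index).getD k [] ≠ [])) := by
  have hL : ((PySem.List.pyRange idx_start (idx_end + 1) 1).filter
      (fun k => decide ((PySem.Dict.mk index).getD k [] ≠ []))).Pairwise (· < ·) :=
    (PySem.List.pairwise_lt_pyRange_one idx_start (idx_end + 1)).filter _
  have hsorted : (PySem.List.sorted
      ((PySem.Set.ofList (index.map Prod.fst)).filter
        (fun k => decide (idx_start ≤ k) && decide (k ≤ idx_end)))
      (fun x => x) false).Pairwise (· < ·) := by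
    have hle := PySem.List.sorted_pairwise
      ((PySem.Set.ofList (index.map Prod.fst)).filter
        (fun k => decide (idx_start ≤ k) && decide (k ≤ idx_end))) (fun x => x) 
    have hnd : (PySem.List.sorted
        ((PySem.Set.ofList (index.map Prod.fst)).filter
          (fun k => decide (idx_start ≤ k) && decide (k ≤ idx_end)))
        (fun x => x) false).Nodup :=
      (PySem.List.sorted_perm _ _ _).nodup_iff.mpr ((PySem.Set.nodup_ofList _).filter _)
    exact hle.imp₂ (fun a b hab hne => lt_of_le_of_ne hab hne) hnd
  have hR := hsorted.filter (fun k => decide ((PySem.Dict.mk index).getD k [] ≠ []))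
  have hmem : ∀ a, a ∈ (PySem.List.pyRange idx_start (idx_end + 1) 1).filter
      (fun k => decide ((PySem.Dict.mk index).getD k [] ≠ []))
      ↔ a ∈ (PySem.List.sorted
          ((PySem.Set.ofList (index.map Prod.fst)).filter
            (fun k => decide (idx_start ≤ k) && decide (k ≤ idx_end)))
          (fun x => x) false).filter
          (fun k => decide ((PySem.Dict.mk index).getD k [] ≠ [])) := by
    intro a
    simp only [List.mem_filter, PySem.List.mem_sorted, PySem.List.mem_pyRange_one,
      PySem.Set.mem_ofList, Bool.and_eq_true, decide_eq_true_eq]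
    constructor
    · rintro ⟨⟨h1, h2⟩, h3⟩
      exact ⟨⟨pvGetD_ne_mem index a h3, h1, by omega⟩, h3⟩
    · rintro ⟨⟨_, h1, h2⟩, h3⟩
      exact ⟨⟨h1, by omega⟩, h3⟩
  have hperm := (List.perm_ext_iff_of_nodup
      (hL.imp (fun h => Int.ne_of_lt h)) (hR.imp (fun h => Int.ne_of_lt h))).2 hmem
  exact hperm.eq_of_pairwise (fun a b _ _ h h' => le_antisymm h.le h'.le) hL hR

-- One component at a time.
theorem pvSide_eq (idx_start idx_end : Int) (index : List (Int × List String)) (col_names : List String) :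
    (PySem.List.pyRange idx_start (idx_end + 1) 1).foldl
      (fun a idx => if (PySem.Dict.mk index).getD idx [] ≠ []
        then a ++ [pvRowA col_names ((PySem.Dict.mk index).getD idx [])] else a) []
    = pvRowsB idx_start idx_end index col_names := by
  unfold pvRowsB
  rw [PySem.List.foldl_append_ite
      (p := fun idx => (PySem.Dict.mk index).getD idx [] ≠ [])
      (f := fun idx => pvRowA col_names ((PySem.Dict.mk index).getD idx []))]
  rw [PySem.List.foldl_append_ite
      (p := fun k => (PySem.Dict.mk index).getD k [] ≠ [])
      (f := fun k => pvRowB col_names ((PySem.Dict.mk index).getD k []))]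
  rw [pvKeys_eq idx_start idx_end index]
  simp only [List.nil_append]
  exact List.map_congr_left (fun k _ => pvRow_eq col_names _)

-- ===== VERDICT (by name: the statement is the Claim_ definition above) =====
theorem fetch_full_block_spec : Claim_equal_fetch_full_block := by
  intro idx_start idx_end source_index corrige_index col_names _
  unfold Spec_fetch_full_block fetch_full_block fetch_full_block_alt
  rw [pvPairFold (PySem.List.pyRange idx_start (idx_end + 1) 1)
    (fun idx => (PySem.Dict.mk source_index).getD idx [] ≠ [])
    (fun idx => (PySem.Dict.mk corrige_index).getD idx [] ≠ [])
    (fun idx => pvRowA col_names ((PySem.Dict.mk source_index).getD idx []))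
    (fun idx => pvRowA col_names ((PySem.Dict.mk corrige_index).getD idx []))
    ([], [])]
  exact Prod.ext (pvSide_eq _ _ _ _) (pvSide_eq _ _ _ _)
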